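-- pv_equiv track=rewrite | github.com/sjindal22/python-programming | degree-of-array.py | minSubtring
-- ===== SOURCE A (Python) =====
-- def minSubtring(arr):
--
--   first, count, response, degree = {}, {}, 0, 0
--
--   for i, a in enumerate(arr):
--
--     first.setdefault(a,i)
--     count[a] = count.get(a,0) + 1
--
--     if count[a] > degree:
--       degree = count[a]
--       response = i - first[a] + 1
--
--     elif count[a] == degree:
--       response = min(response, i - first[a] + 1)
--
--   return response
-- ===== SOURCE B (Python) =====
-- def minSubtring(arr):
--     if not arr:
--         return 0
--     first, last, count = {}, {}, {}
--     for i, a in enumerate(arr):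
--         first.setdefault(a, i)
--         last[a] = i
--         count[a] = count.get(a, 0) + 1
--     degree = max(count.values())
--     return min(last[k] - first[k] + 1 for k in count if count[k] == degree)
-- ===== Notes on version B (the rewrite author's own statement) =====
-- stated objective: simpler
-- what changed: A's single loop threads a running degree and running response that are conditionally updated at every element; B separates concerns: one plain pass builds first/last/count tables with no conditional logic, then degree = max(count.values()) and the answer is a min-reduction over the distinct keys of maximal count.
import Mathlib
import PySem

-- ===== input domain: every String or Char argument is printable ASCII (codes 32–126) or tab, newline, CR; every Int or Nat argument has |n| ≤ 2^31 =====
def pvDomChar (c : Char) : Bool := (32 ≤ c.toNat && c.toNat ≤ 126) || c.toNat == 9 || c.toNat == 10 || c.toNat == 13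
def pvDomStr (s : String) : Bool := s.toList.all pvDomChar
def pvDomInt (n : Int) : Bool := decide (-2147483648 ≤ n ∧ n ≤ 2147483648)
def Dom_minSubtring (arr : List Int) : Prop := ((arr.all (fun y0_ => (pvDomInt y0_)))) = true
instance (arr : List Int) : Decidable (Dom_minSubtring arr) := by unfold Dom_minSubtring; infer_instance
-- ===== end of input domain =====

-- B replaces A's single-pass incremental degree/response state machine by a direct
-- reduction over the distinct elements (count / first index / last index per element); simpler, not faster.

-- ===== PORT A =====
-- state s = (first, count, response, degree); the lookups first[a] / count[a] are ported as
-- getD (at both lookup sites the key was just inserted, so the default is never used)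
def minSubtring (arr : List Int) : Int :=
  let st := (PySem.List.enumerate arr 0).foldl
    (fun (s : PySem.Dict Int Int × PySem.Dict Int Int × Int × Int) p =>
      let first := (s.1).setdefault p.2 p.1
      let count := (s.2.1).insert p.2 ((s.2.1).getD p.2 0 + 1)
      let c := count.getD p.2 0
      if c > s.2.2.2 then (first, count, p.1 - first.getD p.2 0 + 1, c)
      else if c = s.2.2.2 then (first, count, min s.2.2.1 (p.1 - first.getD p.2 0 + 1), s.2.2.2)
      else (first, count, s.2.2.1, s.2.2.2))
    (PySem.Dict.empty, PySem.Dict.empty, 0, 0)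
  st.2.2.1

-- ===== PORT B =====
-- one pass builds the three tables first/last/count (state st), then degree = max(count.values())
-- and the answer is the min over the keys of count; first[k]/last[k]/count[k] on present keys
-- are ported as getD (the default is never used), min()/max() run over nonempty sequences here
def minSubtring_alt (arr : List Int) : Int :=
  if arr = [] then 0
  else
    let st := (PySem.List.enumerate arr 0).foldl
      (fun (s : PySem.Dict Int Int × PySem.Dict Int Int × PySem.Dict Int Int) p =>
        ((s.1).setdefault p.2 p.1, (s.2.1).insert p.2 p.1,
          (s.2.2).insert p.2 ((s.2.2).getD p.2 0 + 1)))
      (PySem.Dict.empty, PySem.Dict.empty, PySem.Dict.empty)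
    let degree : Int := (PySem.List.max? (st.2.2).values (fun x => x)).getD 0
    (PySem.List.min? (((st.2.2).keys.filter (fun k => (st.2.2).getD k 0 == degree)).map
        (fun k => (st.2.1).getD k 0 - (st.1).getD k 0 + 1)) (fun x => x)).getD 0

-- ===== PRECONDITION & SPEC =====
def Spec_minSubtring (arr : List Int) (out : Int) : Prop := out = minSubtring_alt arr
instance (arr : List Int) (out : Int) : Decidable (Spec_minSubtring arr out) := by unfold Spec_minSubtring; infer_instance

-- ===== CLAIM (what is proved, stated in full; the proofs are below) =====
def Claim_equal_minSubtring : Prop := ∀ (arr : List Int), Dom_minSubtring arr → Spec_minSubtring arr (minSubtring arr)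

-- ===== LEMMAS AND PROOFS =====

-- multiplicity of a in p, as an Int
def cntI (p : List Int) (a : Int) : Int := (List.count a p : Int)
-- index of the first / last occurrence of a in p (meaningful when a ∈ p)
def fstI (p : List Int) (a : Int) : Int := (List.idxOf a p : Int)
def lstI (p : List Int) (a : Int) : Int := (p.length : Int) - 1 - (List.idxOf a p.reverse : Int)
def spanI (p : List Int) (a : Int) : Int := lstI p a - fstI p a + 1

-- d is the degree (max multiplicity) of p
def IsDeg (p : List Int) (d : Int) : Prop :=
  (∀ a ∈ p, cntI p a ≤ d) ∧ (p = [] → d = 0) ∧ (p ≠ [] → ∃ a ∈ p, cntI p a = d)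
-- r is the min span over the degree-d elements of p
def IsResp (p : List Int) (d r : Int) : Prop :=
  (p = [] → r = 0) ∧ (∀ a ∈ p, cntI p a = d → r ≤ spanI p a) ∧
  (p ≠ [] → ∃ a ∈ p, cntI p a = d ∧ r = spanI p a)

theorem deg_unique (p : List Int) (d1 d2 : Int) (h1 : IsDeg p d1) (h2 : IsDeg p d2) : d1 = d2 := by
  obtain ⟨u1, e1, w1⟩ := h1; obtain ⟨u2, e2, w2⟩ := h2
  by_cases h : p = []
  · rw [e1 h, e2 h]
  · obtain ⟨a, ha, hc⟩ := w1 h; obtain ⟨b, hb, hc'⟩ := w2 h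
    have := u2 a ha; have := u1 b hb; omega

theorem resp_unique (p : List Int) (d r1 r2 : Int) (h1 : IsResp p d r1) (h2 : IsResp p d r2) : r1 = r2 := by
  obtain ⟨e1, u1, w1⟩ := h1; obtain ⟨e2, u2, w2⟩ := h2
  by_cases h : p = []
  · rw [e1 h, e2 h]
  · obtain ⟨a, ha, hc, hr⟩ := w1 h; obtain ⟨b, hb, hc', hr'⟩ := w2 h
    have := u2 a ha hc; have := u1 b hb hc'; omega

theorem cntI_snoc (p : List Int) (a b : Int) :
    cntI (p ++ [a]) b = cntI p b + if b = a then 1 else 0 := by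
  unfold cntI
  rcases eq_or_ne b a with rfl | h
  · simp [List.count_append]
  · simp [List.count_append, h, Ne.symm h]

theorem fstI_snoc_mem (p : List Int) (a b : Int) (h : b ∈ p) : fstI (p ++ [a]) b = fstI p b := by
  simp [fstI, List.idxOf_append, h]

theorem fstI_snoc_self_not_mem (p : List Int) (a : Int) (h : a ∉ p) :
    fstI (p ++ [a]) a = (p.length : Int) := by
  simp [fstI, List.idxOf_append, h]

theorem lstI_snoc_self (p : List Int) (a : Int) : lstI (p ++ [a]) a = (p.length : Int) := by
  simp [lstI, List.reverse_append]

theorem lstI_snoc_ne (p : List Int) (a b : Int) (h : b ≠ a) : lstI (p ++ [a]) b = lstI p b := by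
  simp [lstI, List.reverse_append, Ne.symm h]
  ring

theorem spanI_snoc_ne (p : List Int) (a b : Int) (h : b ≠ a) (hm : b ∈ p) :
    spanI (p ++ [a]) b = spanI p b := by
  simp [spanI, lstI_snoc_ne p a b h, fstI_snoc_mem p a b hm]

theorem spanI_snoc_self (p : List Int) (a : Int) :
    spanI (p ++ [a]) a = (p.length : Int) - fstI (p ++ [a]) a + 1 := by
  simp [spanI, lstI_snoc_self]

-- A's loop state and step (definitionally the port's lambda)
def stepA (s : PySem.Dict Int Int × PySem.Dict Int Int × Int × Int) (q : Int × Int) :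
    PySem.Dict Int Int × PySem.Dict Int Int × Int × Int :=
  let first := (s.1).setdefault q.2 q.1
  let count := (s.2.1).insert q.2 ((s.2.1).getD q.2 0 + 1)
  let c := count.getD q.2 0
  if c > s.2.2.2 then (first, count, q.1 - first.getD q.2 0 + 1, c)
  else if c = s.2.2.2 then (first, count, min s.2.2.1 (q.1 - first.getD q.2 0 + 1), s.2.2.2)
  else (first, count, s.2.2.1, s.2.2.2)

def InvA (p : List Int) (s : PySem.Dict Int Int × PySem.Dict Int Int × Int × Int) : Prop :=
  (∀ a : Int, (s.2.1).getD a 0 = cntI p a) ∧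
  (∀ a ∈ p, (s.1).get? a = some (fstI p a)) ∧
  (∀ a : Int, a ∉ p → (s.1).get? a = none) ∧
  IsDeg p s.2.2.2 ∧ IsResp p s.2.2.2 s.2.2.1

theorem step_inv (p : List Int) (a : Int) (s : PySem.Dict Int Int × PySem.Dict Int Int × Int × Int)
    (h : InvA p s) : InvA (p ++ [a]) (stepA s ((p.length : Int), a)) := by
  obtain ⟨hcnt, hfst, hfstn, ⟨hub, hemp, hwit⟩, ⟨remp, rub, rwit⟩⟩ := h
  have hc : ((s.2.1.insert a (s.2.1.getD a 0 + 1)).getD a 0) = cntI p a + 1 := by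
    rw [PySem.Dict.getD_insert]; simp [hcnt]
  have hcnt' : ∀ b : Int, ((s.2.1.insert a (s.2.1.getD a 0 + 1)).getD b 0) = cntI (p ++ [a]) b := by
    intro b; rw [PySem.Dict.getD_insert, cntI_snoc]
    split_ifs with hb
    · subst hb; rw [hcnt]
    · rw [hcnt]; ring
  have hF : ∀ b ∈ p ++ [a], ((s.1.setdefault a (p.length : Int)).get? b) = some (fstI (p ++ [a]) b) := by
    intro b hb
    by_cases hba : b = a
    · subst hba
      rw [PySem.Dict.get?_setdefault_self]
      by_cases hm : b ∈ p
      · rw [hfst b hm, fstI_snoc_mem p b b hm]; rfl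
      · rw [hfstn b hm, fstI_snoc_self_not_mem p b hm]; rfl
    · have hm : b ∈ p := by
        rcases List.mem_append.1 hb with h' | h'
        · exact h'
        · simp at h'; exact absurd h' hba
      rw [PySem.Dict.get?_setdefault_of_ne _ _ hba, hfst b hm, fstI_snoc_mem p a b hm]
  have hFn : ∀ b : Int, b ∉ p ++ [a] → ((s.1.setdefault a (p.length : Int)).get? b) = none := by
    intro b hb
    simp only [List.mem_append, List.mem_singleton, not_or] at hb
    rw [PySem.Dict.get?_setdefault_of_ne _ _ hb.2]
    exact hfstn b hb.1
  have hFa : ((s.1.setdefault a (p.length : Int)).getD a 0) = fstI (p ++ [a]) a := by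
    have := hF a (by simp)
    show ((s.1.setdefault a (p.length : Int)).get? a).getD 0 = _
    rw [this]; rfl
  have hamem : a ∈ p ++ [a] := by simp
  have hspan : (p.length : Int) - ((s.1.setdefault a (p.length : Int)).getD a 0) + 1
      = spanI (p ++ [a]) a := by rw [hFa, spanI_snoc_self]
  have hca : cntI (p ++ [a]) a = cntI p a + 1 := by rw [cntI_snoc]; simp
  have hcb : ∀ b : Int, b ≠ a → cntI (p ++ [a]) b = cntI p b := by
    intro b hb; rw [cntI_snoc]; simp [hb]
  have hne : p ++ [a] ≠ [] := by simp
  unfold stepA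
  simp only []
  rw [hc]
  split_ifs with h1 h2 <;> dsimp only [InvA, IsDeg, IsResp]
  · -- new degree: cntI p a + 1 > old degree
    refine ⟨hcnt', hF, hFn, ⟨?_, by simp, ?_⟩, ⟨by simp, ?_, ?_⟩⟩
    · intro b hb
      by_cases hba : b = a
      · subst hba; rw [hca]
      · rw [hcb b hba]
        have := hub b (by rcases List.mem_append.1 hb with h' | h' <;> simp_all)
        omega
    · exact fun _ => ⟨a, hamem, by rw [hca]⟩
    · intro b hb hcb'
      by_cases hba : b = a
      · subst hba; rw [hspan]
      · have hbp : b ∈ p := by rcases List.mem_append.1 hb with h' | h' <;> simp_all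
        rw [hcb b hba] at hcb'
        have := hub b hbp; omega
    · exact fun _ => ⟨a, hamem, by rw [hca], by rw [hspan]⟩
  · -- cntI p a + 1 = old degree d
    have hp : p ≠ [] := by
      intro hp0
      have hd0 := hemp hp0
      subst hp0
      simp [cntI] at h2
      omega
    refine ⟨hcnt', hF, hFn, ⟨?_, by simp, ?_⟩, ⟨by simp, ?_, ?_⟩⟩
    · intro b hb
      by_cases hba : b = a
      · subst hba; rw [hca]; omega
      · rw [hcb b hba]
        have hbp : b ∈ p := by rcases List.mem_append.1 hb with h' | h' <;> simp_all
        exact hub b hbp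
    · exact fun _ => ⟨a, hamem, by rw [hca]; omega⟩
    · intro b hb hcb'
      by_cases hba : b = a
      · subst hba
        calc min s.2.2.1 ((p.length : Int) - ((s.1.setdefault b (p.length : Int)).getD b 0) + 1)
            ≤ _ := min_le_right _ _
          _ = spanI (p ++ [b]) b := hspan
      · have hbp : b ∈ p := by rcases List.mem_append.1 hb with h' | h' <;> simp_all
        rw [hcb b hba] at hcb'
        have := rub b hbp hcb'
        rw [spanI_snoc_ne p a b hba hbp]
        exact le_trans (min_le_left _ _) this
    · intro _
      rcases le_total s.2.2.1 ((p.length : Int) - ((s.1.setdefault a (p.length : Int)).getD a 0) + 1) with hle | hle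
      · obtain ⟨b0, hb0, hcb0, hr0⟩ := rwit hp
        have hb0a : b0 ≠ a := by intro he; subst he; omega
        refine ⟨b0, List.mem_append.2 (Or.inl hb0), by rw [hcb b0 hb0a]; exact hcb0, ?_⟩
        rw [spanI_snoc_ne p a b0 hb0a hb0, min_eq_left hle, hr0]
      · exact ⟨a, hamem, by rw [hca]; omega, by rw [min_eq_right hle, hspan]⟩
  · -- cntI p a + 1 < old degree d
    have hlt : cntI p a + 1 < s.2.2.2 := by omega
    have hp : p ≠ [] := by
      intro hp0
      have hd0 := hemp hp0
      subst hp0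
      simp [cntI] at hlt
      omega
    refine ⟨hcnt', hF, hFn, ⟨?_, by simp, ?_⟩, ⟨by simp, ?_, ?_⟩⟩
    · intro b hb
      by_cases hba : b = a
      · subst hba; rw [hca]; omega
      · rw [hcb b hba]
        have hbp : b ∈ p := by rcases List.mem_append.1 hb with h' | h' <;> simp_all
        exact hub b hbp
    · intro _
      obtain ⟨b0, hb0, hcb0⟩ := hwit hp
      have hb0a : b0 ≠ a := by intro he; subst he; omega
      exact ⟨b0, List.mem_append.2 (Or.inl hb0), by rw [hcb b0 hb0a]; exact hcb0⟩
    · intro b hb hcb'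
      by_cases hba : b = a
      · subst hba; rw [hca] at hcb'; omega
      · have hbp : b ∈ p := by rcases List.mem_append.1 hb with h' | h' <;> simp_all
        rw [hcb b hba] at hcb'
        rw [spanI_snoc_ne p a b hba hbp]
        exact rub b hbp hcb'
    · intro _
      obtain ⟨b0, hb0, hcb0, hr0⟩ := rwit hp
      have hb0a : b0 ≠ a := by intro he; subst he; omega
      exact ⟨b0, List.mem_append.2 (Or.inl hb0), by rw [hcb b0 hb0a]; exact hcb0,
        by rw [spanI_snoc_ne p a b0 hb0a hb0]; exact hr0⟩

theorem foldA_inv (p : List Int) :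
    InvA p ((PySem.List.enumerate p 0).foldl stepA (PySem.Dict.empty, PySem.Dict.empty, 0, 0)) := by
  induction p using List.reverseRecOn with
  | nil =>
    refine ⟨?_, by simp, ?_, ⟨by simp, fun _ => rfl, by simp⟩, ⟨fun _ => rfl, by simp, by simp⟩⟩
    · intro a
      show ((PySem.Dict.empty : PySem.Dict Int Int).get? a).getD 0 = _
      rw [PySem.Dict.get?_empty]; rfl
    · intro a _; exact PySem.Dict.get?_empty a
  | append_singleton p a ih =>
    rw [PySem.List.enumerate_append, List.foldl_append]
    have h1 : PySem.List.enumerate [a] (0 + (p.length : Int)) = [((p.length : Int), a)] := by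
      rw [PySem.List.enumerate_cons]; simp [PySem.List.enumerate_nil]
    rw [h1]
    exact step_inv p a _ ih

theorem minSubtring_eq_fold (arr : List Int) :
    minSubtring arr
      = ((PySem.List.enumerate arr 0).foldl stepA (PySem.Dict.empty, PySem.Dict.empty, 0, 0)).2.2.1 := rfl

theorem A_spec (arr : List Int) :
    ∃ d : Int, IsDeg arr d ∧ IsResp arr d (minSubtring arr) := by
  obtain ⟨_, _, _, hdA, hrA⟩ := foldA_inv arr
  exact ⟨_, hdA, by rw [minSubtring_eq_fold]; exact hrA⟩

-- B's loop state and step (definitionally the port's lambda)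
def stepB (s : PySem.Dict Int Int × PySem.Dict Int Int × PySem.Dict Int Int) (q : Int × Int) :
    PySem.Dict Int Int × PySem.Dict Int Int × PySem.Dict Int Int :=
  ((s.1).setdefault q.2 q.1, (s.2.1).insert q.2 q.1,
    (s.2.2).insert q.2 ((s.2.2).getD q.2 0 + 1))

def foldB (p : List Int) : PySem.Dict Int Int × PySem.Dict Int Int × PySem.Dict Int Int :=
  (PySem.List.enumerate p 0).foldl stepB (PySem.Dict.empty, PySem.Dict.empty, PySem.Dict.empty)

theorem count_proj (qs : List (Int × Int))
    (s : PySem.Dict Int Int × PySem.Dict Int Int × PySem.Dict Int Int) :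
    (qs.foldl stepB s).2.2
      = qs.foldl (fun d (q : Int × Int) => d.insert q.2 (d.getD q.2 0 + 1)) s.2.2 := by
  induction qs generalizing s with
  | nil => rfl
  | cons q t ih => rw [List.foldl_cons, List.foldl_cons, ih]; rfl

theorem foldB_count (p : List Int) : (foldB p).2.2 = PySem.Dict.counter p := by
  rw [foldB, count_proj]
  dsimp only
  have h : p.foldl (fun d x => d.insert x (d.getD x 0 + 1)) (PySem.Dict.empty : PySem.Dict Int Int)
      = (PySem.List.enumerate p 0).foldl (fun d (q : Int × Int) => d.insert q.2 (d.getD q.2 0 + 1))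
          (PySem.Dict.empty : PySem.Dict Int Int) := by
    conv_lhs => rw [← PySem.List.map_snd_enumerate p 0]
    rw [List.foldl_map]
  exact h.symm.trans (PySem.Dict.foldl_insert_getD_add_one_eq_counter _)

theorem foldB_inv (p : List Int) :
    (∀ a ∈ p, (foldB p).1.get? a = some (fstI p a)) ∧
    (∀ a : Int, a ∉ p → (foldB p).1.get? a = none) ∧
    (∀ a ∈ p, (foldB p).2.1.getD a 0 = lstI p a) := by
  induction p using List.reverseRecOn with
  | nil =>
    refine ⟨by simp, ?_, by simp⟩
    intro a _; exact PySem.Dict.get?_empty a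
  | append_singleton p a ih =>
    obtain ⟨h1, h2, h3⟩ := ih
    have hstep : foldB (p ++ [a]) = stepB (foldB p) ((p.length : Int), a) := by
      rw [foldB, PySem.List.enumerate_append, List.foldl_append]
      have he : PySem.List.enumerate [a] (0 + (p.length : Int)) = [((p.length : Int), a)] := by
        rw [PySem.List.enumerate_cons]; simp [PySem.List.enumerate_nil]
      rw [he]; rfl
    rw [hstep]
    unfold stepB
    dsimp only
    refine ⟨?_, ?_, ?_⟩
    · intro b hb
      by_cases hba : b = a
      · subst hba
        rw [PySem.Dict.get?_setdefault_self]
        by_cases hm : b ∈ p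
        · rw [h1 b hm, fstI_snoc_mem p b b hm]; rfl
        · rw [h2 b hm, fstI_snoc_self_not_mem p b hm]; rfl
      · have hm : b ∈ p := by
          rcases List.mem_append.1 hb with h' | h'
          · exact h'
          · simp at h'; exact absurd h' hba
        rw [PySem.Dict.get?_setdefault_of_ne _ _ hba, h1 b hm, fstI_snoc_mem p a b hm]
    · intro b hb
      simp only [List.mem_append, List.mem_singleton, not_or] at hb
      rw [PySem.Dict.get?_setdefault_of_ne _ _ hb.2]
      exact h2 b hb.1
    · intro b hb
      rw [PySem.Dict.getD_insert]
      by_cases hba : b = a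
      · rw [if_pos hba, hba, lstI_snoc_self]
      · rw [if_neg hba, lstI_snoc_ne p a b hba]
        have hm : b ∈ p := by
          rcases List.mem_append.1 hb with h' | h'
          · exact h'
          · simp at h'; exact absurd h' hba
        exact h3 b hm

theorem minSubtring_alt_eq_fold (arr : List Int) (h : arr ≠ []) :
    minSubtring_alt arr
      = ((PySem.List.min? ((((foldB arr).2.2).keys.filter
          (fun k => ((foldB arr).2.2).getD k 0
            == ((PySem.List.max? ((foldB arr).2.2).values (fun x => x)).getD 0 : Int))).map
          (fun k => ((foldB arr).2.1).getD k 0 - ((foldB arr).1).getD k 0 + 1)) (fun x => x)).getD 0) := by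
  rw [minSubtring_alt, if_neg h]
  rfl

theorem B_spec (arr : List Int) (h : arr ≠ []) :
    ∃ d : Int, IsDeg arr d ∧ IsResp arr d (minSubtring_alt arr) := by
  obtain ⟨x, hx⟩ := List.exists_mem_of_ne_nil arr h
  have hxs : x ∈ PySem.Set.ofList arr := (PySem.Set.mem_ofList _ _).2 hx
  obtain ⟨hfst, hfstn, hlst⟩ := foldB_inv arr
  have hcd := foldB_count arr
  rw [minSubtring_alt_eq_fold arr h, hcd]
  have hvals : (PySem.Dict.counter arr).values
      = (PySem.Set.ofList arr).map (fun k => ((List.count k arr : Nat) : Int)) := by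
    show ((PySem.Dict.counter arr).items).map (·.2) = _
    rw [PySem.Dict.items_counter, List.map_map]; rfl
  rw [hvals, PySem.Dict.keys_counter]
  set L := (PySem.Set.ofList arr).map (fun k => ((List.count k arr : Nat) : Int)) with hL
  have hLne : L ≠ [] := by
    rw [hL]; simp only [ne_eq, List.map_eq_nil_iff]
    exact fun h' => by rw [h'] at hxs; simp at hxs
  cases hmax : PySem.List.max? L (fun x => x) with
  | none => exact absurd ((PySem.List.max?_eq_none_iff _ _).1 hmax) hLne
  | some m =>
  simp only [Option.getD_some]
  have hub : ∀ b ∈ arr, cntI arr b ≤ m := by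
    intro b hb
    have hbs : b ∈ PySem.Set.ofList arr := (PySem.Set.mem_ofList _ _).2 hb
    have hmem : ((List.count b arr : Nat) : Int) ∈ L := by
      rw [hL]; exact List.mem_map_of_mem hbs
    exact PySem.List.max?_isMax hmax _ hmem
  obtain ⟨a0, ha0s, ha0⟩ : ∃ a ∈ PySem.Set.ofList arr, ((List.count a arr : Nat) : Int) = m := by
    have := PySem.List.max?_mem hmax
    rw [hL] at this
    obtain ⟨a, ha, he⟩ := List.mem_map.1 this
    exact ⟨a, ha, he⟩
  have ha0arr : a0 ∈ arr := (PySem.Set.mem_ofList _ _).1 ha0s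
  have hdeg : IsDeg arr m :=
    ⟨hub, fun h' => absurd h' h, fun _ => ⟨a0, ha0arr, ha0⟩⟩
  set F := (PySem.Set.ofList arr).filter (fun k => (PySem.Dict.counter arr).getD k 0 == m) with hF
  have hmemF : ∀ b : Int, b ∈ F ↔ b ∈ arr ∧ cntI arr b = m := by
    intro b
    rw [hF, List.mem_filter, PySem.Dict.getD_counter]
    constructor
    · rintro ⟨h1, h2⟩
      exact ⟨(PySem.Set.mem_ofList _ _).1 h1, beq_iff_eq.1 h2⟩
    · rintro ⟨h1, h2⟩
      exact ⟨(PySem.Set.mem_ofList _ _).2 h1, beq_iff_eq.2 h2⟩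
  have hMspan : F.map (fun k => ((foldB arr).2.1).getD k 0 - ((foldB arr).1).getD k 0 + 1)
      = F.map (fun k => spanI arr k) := by
    apply List.map_congr_left
    intro b hbF
    have hbarr : b ∈ arr := ((hmemF b).1 hbF).1
    have hgD : ((foldB arr).1).getD b 0 = fstI arr b := by
      show (((foldB arr).1).get? b).getD 0 = _
      rw [hfst b hbarr]; rfl
    rw [hlst b hbarr, hgD]; rfl
  rw [hMspan]
  set M := F.map (fun k => spanI arr k) with hM
  have ha0F : a0 ∈ F := (hmemF a0).2 ⟨ha0arr, ha0⟩
  have hMne : M ≠ [] := by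
    rw [hM]; simp only [ne_eq, List.map_eq_nil_iff]
    exact fun h' => by rw [h'] at ha0F; simp at ha0F
  cases hmin : PySem.List.min? M (fun x => x) with
  | none => exact absurd ((PySem.List.min?_eq_none_iff _ _).1 hmin) hMne
  | some r =>
  simp only [Option.getD_some]
  refine ⟨m, hdeg, fun h' => absurd h' h, ?_, ?_⟩
  · intro b hb hc
    have hbF : b ∈ F := (hmemF b).2 ⟨hb, hc⟩
    have hsp : spanI arr b ∈ M := by rw [hM]; exact List.mem_map_of_mem hbF
    exact PySem.List.min?_isMin hmin _ hsp
  · intro _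
    have := PySem.List.min?_mem hmin
    rw [hM] at this
    obtain ⟨b, hbF, he⟩ := List.mem_map.1 this
    obtain ⟨hbarr, hbc⟩ := (hmemF b).1 hbF
    exact ⟨b, hbarr, hbc, he.symm⟩

-- ===== VERDICT (by name: the statement is the Claim_ definition above) =====
theorem minSubtring_spec : Claim_equal_minSubtring := by
  intro arr _
  unfold Spec_minSubtring
  by_cases h : arr = []
  · subst h; decide
  · obtain ⟨d, hdB, hrB⟩ := B_spec arr h
    obtain ⟨d', hdA, hrA⟩ := A_spec arr
    have hd := deg_unique arr d' d hdA hdB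
    rw [hd] at hrA
    exact resp_unique arr d _ _ hrA hrB
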